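-- pv_equiv track=rewrite | github.com/Manmit124/social-ai-agents | backend/agent/tools.py | combine_content_and_hashtags
-- ===== SOURCE A (Python) =====
-- from typing import List
--
-- def combine_content_and_hashtags(content: str, hashtags: List[str]) -> str:
--     """
--     Combine tweet content with hashtags.
--
--     Args:
--         content: Tweet content
--         hashtags: List of hashtags
--
--     Returns:
--         Combined content with hashtags
--     """
--     if not hashtags:
--         return content
--
--     # Add hashtags with proper spacing
--     hashtags_str = " ".join(hashtags)
--     combined = f"{content}\n\n{hashtags_str}"
--
--     # Ensure it's within 280 characters
--     if len(combined) > 280: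
--         # Try without newlines
--         combined = f"{content} {hashtags_str}"
--
--         # If still too long, remove hashtags one by one
--         while len(combined) > 280 and hashtags:
--             hashtags.pop()
--             hashtags_str = " ".join(hashtags)
--             combined = f"{content} {hashtags_str}" if hashtags else content
--
--     return combined
-- ===== SOURCE B (Python) =====
-- def combine_content_and_hashtags(content: str, hashtags: list) -> str:
--     """Single forward pass instead of A's quadratic pop-and-rejoin loop."""
--     if not hashtags:
--         return content
--     hashtags_str = " ".join(hashtags)
--     if len(content) + 2 + len(hashtags_str) <= 280:
--         return f"{content}\n\n{hashtags_str}"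
--     # Too long with "\n\n": find largest prefix m whose space-joined form fits.
--     running = len(content)
--     m = 0
--     for tag in hashtags:
--         running += 1 + len(tag)
--         if running > 280:
--             break
--         m += 1
--     del hashtags[m:]  # same in-place truncation A performs
--     if hashtags:
--         return f"{content} {' '.join(hashtags)}"
--     return content
-- ===== Notes on version B (the rewrite author's own statement) =====
-- stated objective: faster
-- what changed: Replaces A's pop-from-the-end-and-rejoin while loop (re-joining the whole list after every pop) with one forward pass that keeps a running length and finds the largest fitting prefix directly.
import Mathlib
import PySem

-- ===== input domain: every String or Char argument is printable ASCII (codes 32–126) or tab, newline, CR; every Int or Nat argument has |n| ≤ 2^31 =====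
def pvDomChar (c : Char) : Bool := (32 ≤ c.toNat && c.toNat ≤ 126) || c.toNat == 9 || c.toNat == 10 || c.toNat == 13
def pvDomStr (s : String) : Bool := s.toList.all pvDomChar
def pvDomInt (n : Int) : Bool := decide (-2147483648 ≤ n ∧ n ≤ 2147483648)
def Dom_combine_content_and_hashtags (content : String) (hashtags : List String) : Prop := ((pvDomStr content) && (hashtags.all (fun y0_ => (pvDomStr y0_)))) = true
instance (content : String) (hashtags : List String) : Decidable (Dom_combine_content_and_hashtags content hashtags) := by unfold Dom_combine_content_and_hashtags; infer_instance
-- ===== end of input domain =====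

-- B replaces A's pop-and-rejoin while loop by one forward pass over the hashtags
-- (objective: faster). Python A mutates `hashtags` in place (pops); Python B performs
-- the same truncation; the equivalence proved here is about the RETURN value.

-- ===== PORT A =====
-- while len(combined) > 280 and hashtags: hashtags.pop(); rejoin; rebuild combined
def pvPopLoop (content : String) (combined : String) (hashtags : List String) : String :=
  if hc : PySem.Str.len combined > 280 ∧ hashtags ≠ [] then
    let h' := hashtags.dropLast
    let s := PySem.Str.join " " h'
    pvPopLoop content (if h' ≠ [] then content ++ " " ++ s else content) h'
  else combined
termination_by hashtags.length
decreasing_by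
  have := List.length_pos_of_ne_nil hc.2
  simp [List.length_dropLast]; omega

def combine_content_and_hashtags (content : String) (hashtags : List String) : String :=
  if hashtags = [] then content
  else
    let s := PySem.Str.join " " hashtags
    let combined := content ++ "\n\n" ++ s
    if PySem.Str.len combined > 280 then
      pvPopLoop content (content ++ " " ++ s) hashtags
    else combined

-- ===== PORT B =====
-- forward scan: running length, count of the largest fitting prefix (the for/break loop)
def pvScan (running : Int) (m : Nat) : List String → Nat
  | [] => m
  | t :: rest =>
    if running + 1 + PySem.Str.len t > 280 then m
    else pvScan (running + 1 + PySem.Str.len t) (m + 1) rest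

def combine_content_and_hashtags_alt (content : String) (hashtags : List String) : String :=
  if hashtags = [] then content
  else
    let hashtags_str := PySem.Str.join " " hashtags
    if PySem.Str.len content + 2 + PySem.Str.len hashtags_str ≤ 280 then
      content ++ "\n\n" ++ hashtags_str
    else
      let m := pvScan (PySem.Str.len content) 0 hashtags
      let kept := hashtags.take m
      if kept = [] then content else content ++ " " ++ PySem.Str.join " " kept

-- ===== PRECONDITION & SPEC =====
def Spec_combine_content_and_hashtags (content : String) (hashtags : List String) (out : String) : Prop := out = combine_content_and_hashtags_alt content hashtags
instance (content : String) (hashtags : List String) (out : String) : Decidable (Spec_combine_content_and_hashtags content hashtags out) := by unfold Spec_combine_content_and_hashtags; infer_instance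

-- ===== CLAIM (what is proved, stated in full; the proofs are below) =====
def Claim_equal_combine_content_and_hashtags : Prop := ∀ (content : String) (hashtags : List String), Dom_combine_content_and_hashtags content hashtags → Spec_combine_content_and_hashtags content hashtags (combine_content_and_hashtags content hashtags)

-- ===== LEMMAS AND PROOFS =====

-- length of string append, in PySem.Str.len form
theorem pvLen_append (a b : String) :
    PySem.Str.len (a ++ b) = PySem.Str.len a + PySem.Str.len b := by
  simp [PySem.Str.len]

-- the weighted sum that tracks the length of `content + " " + " ".join(prefix)`
def pvSum (l : List String) : Int := (l.map (fun t => 1 + PySem.Str.len t)).sum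

theorem pvSum_nonneg (l : List String) : 0 ≤ pvSum l := by
  induction l with
  | nil => simp [pvSum]
  | cons x r ih =>
    simp only [pvSum, List.map_cons, List.sum_cons] at *
    have : (0:Int) ≤ PySem.Str.len x := by simp [PySem.Str.len]
    omega

theorem pvSum_cons (x : String) (l : List String) :
    pvSum (x :: l) = 1 + PySem.Str.len x + pvSum l := by
  simp [pvSum]

theorem pvJoin_singleton (x : String) : PySem.Str.join " " [x] = x := by
  have h : (PySem.Str.join " " [x]).toList = x.toList := by
    simp [PySem.Str.toList_join, PySem.Chars.join_singleton]
  exact String.toList_inj.mp h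

theorem pvJoin_cons_cons (x y : String) (t : List String) :
    PySem.Str.join " " (x :: y :: t) = x ++ " " ++ PySem.Str.join " " (y :: t) := by
  have h : (PySem.Str.join " " (x :: y :: t)).toList
      = (x ++ " " ++ PySem.Str.join " " (y :: t)).toList := by
    simp [PySem.Str.toList_join, PySem.Chars.join_cons_cons]
  exact String.toList_inj.mp h

theorem pvJoin_len (l : List String) (h : l ≠ []) :
    PySem.Str.len (PySem.Str.join " " l) = pvSum l - 1 := by
  induction l with
  | nil => simp at h
  | cons x r ih =>
    cases r with
    | nil =>
      rw [pvJoin_singleton]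
      simp [pvSum]
    | cons y t =>
      have hr : (y :: t : List String) ≠ [] := by simp
      have hlen : PySem.Str.len (PySem.Str.join " " (y :: t)) = pvSum (y :: t) - 1 := ih hr
      have hc : pvSum (x :: y :: t) = 1 + PySem.Str.len x + pvSum (y :: t) := pvSum_cons _ _
      have hsp : PySem.Str.len " " = 1 := by decide
      rw [pvJoin_cons_cons, pvLen_append, pvLen_append, hlen, hc, hsp]
      omega

-- length of the rebuilt combined string for a nonempty prefix
theorem pvCombined_len (content : String) (l : List String) (h : l ≠ []) :
    PySem.Str.len (content ++ " " ++ PySem.Str.join " " l)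
      = PySem.Str.len content + pvSum l := by
  rw [pvLen_append, pvLen_append, pvJoin_len l h]
  have : PySem.Str.len " " = 1 := by decide
  omega

-- the scan runs to the end when the full joined form fits
theorem pvScan_full (rest : List String) : ∀ (L : Int) (m : Nat),
    L + pvSum rest ≤ 280 → pvScan L m rest = m + rest.length := by
  induction rest with
  | nil => intro L m _; simp [pvScan]
  | cons t r ih =>
    intro L m hfit
    have hc : pvSum (t :: r) = 1 + PySem.Str.len t + pvSum r := pvSum_cons _ _
    have hr : 0 ≤ pvSum r := pvSum_nonneg r
    have hnot : ¬ (L + 1 + PySem.Str.len t > 280) := by omega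
    simp only [pvScan, if_neg hnot]
    rw [ih (L + 1 + PySem.Str.len t) (m + 1) (by omega)]
    simp only [List.length_cons]; omega

-- the scan never counts past the list
theorem pvScan_le (rest : List String) : ∀ (L : Int) (m : Nat),
    pvScan L m rest ≤ m + rest.length := by
  induction rest with
  | nil => intro L m; simp [pvScan]
  | cons t r ih =>
    intro L m
    simp only [pvScan]
    split
    · omega
    · have := ih (L + 1 + PySem.Str.len t) (m + 1); simp at *; omega

-- when the whole list does not fit, the scan never reaches the last element
theorem pvScan_dropLast (l : List String) : ∀ (t : String) (L : Int) (m : Nat),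
    L + pvSum (l ++ [t]) > 280 → pvScan L m (l ++ [t]) = pvScan L m l := by
  induction l with
  | nil =>
    intro t L m hbig
    have hc : pvSum [t] = 1 + PySem.Str.len t + pvSum [] := pvSum_cons _ _
    have h0 : pvSum ([] : List String) = 0 := by simp [pvSum]
    have hpos : L + 1 + PySem.Str.len t > 280 := by
      simp only [List.nil_append] at hbig; omega
    simp only [List.nil_append, pvScan, if_pos hpos]
  | cons x r ih =>
    intro t L m hbig
    have hb' : (L + 1 + PySem.Str.len x) + pvSum (r ++ [t]) > 280 := by
      have h1 : pvSum ((x :: r) ++ [t]) = 1 + PySem.Str.len x + pvSum (r ++ [t]) := by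
        rw [List.cons_append]; exact pvSum_cons _ _
      omega
    simp only [List.cons_append, pvScan]
    split
    · rfl
    · exact ih t _ _ hb'

-- the result B computes in the too-long branch, as a function
def pvBRes (content : String) (h : List String) : String :=
  let kept := h.take (pvScan (PySem.Str.len content) 0 h)
  if kept = [] then content else content ++ " " ++ PySem.Str.join " " kept

-- A's pop loop computes exactly B's forward-scan result
theorem pvPopLoop_eq (content : String) (h : List String) :
    pvPopLoop content
      (if h = [] then content else content ++ " " ++ PySem.Str.join " " h) h
      = pvBRes content h := by
  induction h using List.reverseRecOn with
  | nil =>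
    rw [pvPopLoop]
    simp [pvBRes, pvScan]
  | append_singleton l t ih =>
    have hne : l ++ [t] ≠ [] := by simp
    rw [if_neg hne, pvPopLoop]
    by_cases hbig : PySem.Str.len (content ++ " " ++ PySem.Str.join " " (l ++ [t])) > 280
    · -- pops: recursive call on l
      rw [dif_pos ⟨hbig, hne⟩]
      simp only [List.dropLast_concat]
      have step : (if l ≠ [] then content ++ " " ++ PySem.Str.join " " l else content)
          = (if l = [] then content else content ++ " " ++ PySem.Str.join " " l) := by
        by_cases hl : l = [] <;> simp [hl]
      rw [step, ih]
      -- now show pvBRes content l = pvBRes content (l ++ [t])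
      have hsum : PySem.Str.len content + pvSum (l ++ [t]) > 280 := by
        rwa [pvCombined_len content (l ++ [t]) hne] at hbig
      have hscan : pvScan (PySem.Str.len content) 0 (l ++ [t])
          = pvScan (PySem.Str.len content) 0 l :=
        pvScan_dropLast l t (PySem.Str.len content) 0 hsum
      have hle : pvScan (PySem.Str.len content) 0 l ≤ l.length := by
        have := pvScan_le l (PySem.Str.len content) 0; omega
      unfold pvBRes
      rw [hscan, List.take_append_of_le_length hle]
    · -- fits: loop exits immediately with the full combined
      rw [dif_neg (by tauto)]
      have hsum : PySem.Str.len content + pvSum (l ++ [t]) ≤ 280 := by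
        have := pvCombined_len content (l ++ [t]) hne; omega
      have hscan : pvScan (PySem.Str.len content) 0 (l ++ [t]) = (l ++ [t]).length := by
        have := pvScan_full (l ++ [t]) (PySem.Str.len content) 0 hsum; simpa using this
      unfold pvBRes
      rw [hscan, List.take_length, if_neg hne]

-- the "\n\n" condition of A is the arithmetic condition of B
theorem pvNl_len (content s : String) :
    PySem.Str.len (content ++ "\n\n" ++ s)
      = PySem.Str.len content + 2 + PySem.Str.len s := by
  rw [pvLen_append, pvLen_append]
  have : PySem.Str.len "\n\n" = 2 := by decide
  omega

-- ===== VERDICT (by name: the statement is the Claim_ definition above) =====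
theorem combine_content_and_hashtags_spec : Claim_equal_combine_content_and_hashtags := by
  intro content hashtags _
  unfold Spec_combine_content_and_hashtags combine_content_and_hashtags combine_content_and_hashtags_alt
  by_cases hnil : hashtags = []
  · simp [hnil]
  · rw [if_neg hnil, if_neg hnil]
    by_cases hfit : PySem.Str.len content + 2 + PySem.Str.len (PySem.Str.join " " hashtags) ≤ 280
    · rw [if_pos hfit, if_neg (by rw [pvNl_len]; omega)]
    · rw [if_neg hfit, if_pos (by rw [pvNl_len]; omega)]
      have := pvPopLoop_eq content hashtags
      rw [if_neg hnil] at this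
      rw [this]
      rfl
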